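-- pv_equiv track=rewrite | github.com/SergiFlorensa/OpenCareM | app/services/rag_retriever.py | _ids_from_gaps
-- ===== SOURCE A (Python) =====
-- def _ids_from_gaps(gaps: list[int]) -> list[int]:
--     ids: list[int] = []
--     current = 0
--     for gap in gaps:
--         safe_gap = max(0, int(gap))
--         if safe_gap <= 0:
--             continue
--         current += safe_gap
--         ids.append(current)
--     return ids
-- ===== SOURCE B (Python) =====
-- def _ids_from_gaps(gaps: list[int]) -> list[int]:
--     # Different algorithm: first compute the grand total of the positive gaps,
--     # then walk the list BACKWARDS: at each positive gap emit the total of the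
--     # positives up to it (remaining), and subtract the gap; finally reverse.
--     remaining = sum(g for g in map(int, gaps) if g > 0)
--     out: list[int] = []
--     for gap in reversed(gaps):
--         g = int(gap)
--         if g > 0:
--             out.append(remaining)
--             remaining -= g
--     out.reverse()
--     return out
-- ===== Notes on version B (the rewrite author's own statement) =====
-- stated objective: alternative
-- what changed: A builds the prefix sums front-to-back with a running accumulator; B first computes the grand total of the positive gaps, then walks the list backwards emitting the remaining total at each positive gap (subtracting as it goes) and reverses the result, i.e. it derives each prefix sum as total-minus-suffix instead of accumulating a prefix.
import Mathlib
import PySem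

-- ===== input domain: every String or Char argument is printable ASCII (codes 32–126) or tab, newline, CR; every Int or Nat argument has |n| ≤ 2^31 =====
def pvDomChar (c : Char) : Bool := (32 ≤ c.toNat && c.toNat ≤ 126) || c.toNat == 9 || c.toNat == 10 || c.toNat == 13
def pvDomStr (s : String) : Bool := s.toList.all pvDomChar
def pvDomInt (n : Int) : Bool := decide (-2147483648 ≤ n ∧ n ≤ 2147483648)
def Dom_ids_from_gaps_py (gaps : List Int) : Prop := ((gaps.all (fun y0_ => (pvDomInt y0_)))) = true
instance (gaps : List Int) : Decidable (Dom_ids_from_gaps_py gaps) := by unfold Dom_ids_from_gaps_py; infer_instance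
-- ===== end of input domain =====

-- B replaces A's forward running accumulator by: total of the positive gaps first,
-- then a backward walk that emits total-minus-suffix at each positive gap (alternative, same O(n)).

-- ===== PORT A =====
-- single forward loop with state (ids, current); 'continue' = keep the state unchanged
def ids_from_gaps_py (gaps : List Int) : List Int :=
  (gaps.foldl
    (fun (st : List Int × Int) gap =>
      let safe_gap := max 0 gap          -- int(gap) is the identity on ints
      if safe_gap ≤ 0 then st
      else (st.1 ++ [st.2 + safe_gap], st.2 + safe_gap))
    ([], 0)).1

-- ===== PORT B =====
-- remaining = sum of the positive gaps; then 'for gap in reversed(gaps)' with state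
-- (out, remaining), appending 'remaining' and subtracting at each positive gap; out.reverse()
def ids_from_gaps_py_alt (gaps : List Int) : List Int :=
  let remaining := (gaps.filter (fun g => 0 < g)).sum
  ((gaps.reverse.foldl
      (fun (st : List Int × Int) gap =>
        if 0 < gap then (st.1 ++ [st.2], st.2 - gap) else st)
      ([], remaining)).1).reverse

-- ===== PRECONDITION & SPEC =====
def Spec_ids_from_gaps_py (gaps : List Int) (out : List Int) : Prop := out = ids_from_gaps_py_alt gaps
instance (gaps : List Int) (out : List Int) : Decidable (Spec_ids_from_gaps_py gaps out) := by unfold Spec_ids_from_gaps_py; infer_instance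

-- ===== CLAIM (what is proved, stated in full; the proofs are below) =====
def Claim_equal_ids_from_gaps_py : Prop := ∀ (gaps : List Int), Dom_ids_from_gaps_py gaps → Spec_ids_from_gaps_py gaps (ids_from_gaps_py gaps)

-- ===== LEMMAS AND PROOFS =====

-- forward prefix sums of a list, with carry c (what A computes on the positive gaps)
def pvPrefixes : Int → List Int → List Int
  | _, [] => []
  | c, x :: xs => (c + x) :: pvPrefixes (c + x) xs

-- descending remainders r, r - q0, r - q0 - q1, … (what B's backward loop emits)
def pvDesc : Int → List Int → List Int
  | _, [] => []
  | r, q :: qs => r :: pvDesc (r - q) qs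

-- A's loop computes ids ++ prefix sums (with carry c) of the positive gaps
theorem pvA_eq (gaps : List Int) : ∀ (ids : List Int) (c : Int),
    (gaps.foldl
      (fun (st : List Int × Int) gap =>
        let safe_gap := max 0 gap
        if safe_gap ≤ 0 then st
        else (st.1 ++ [st.2 + safe_gap], st.2 + safe_gap))
      (ids, c)).1 = ids ++ pvPrefixes c (gaps.filter (fun g => 0 < g)) := by
  induction gaps with
  | nil => simp [pvPrefixes]
  | cons g gs ih =>
    intro ids c
    by_cases hg : 0 < g
    · have hmax : max 0 g = g := by omega
      have step : (fun (st : List Int × Int) gap =>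
          let safe_gap := max 0 gap
          if safe_gap ≤ 0 then st
          else (st.1 ++ [st.2 + safe_gap], st.2 + safe_gap)) (ids, c) g
          = (ids ++ [c + g], c + g) := by
        simp only [hmax]
        rw [if_neg (by omega : ¬ g ≤ 0)]
      simp only [List.foldl_cons, List.filter_cons, hg, decide_true, if_true, step, ih]
      simp [pvPrefixes]
    · have step : (fun (st : List Int × Int) gap =>
          let safe_gap := max 0 gap
          if safe_gap ≤ 0 then st
          else (st.1 ++ [st.2 + safe_gap], st.2 + safe_gap)) (ids, c) g
          = (ids, c) := by
        simp [show max 0 g = 0 from by omega]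
      simp only [List.foldl_cons, List.filter_cons, hg, decide_false,
        Bool.false_eq_true, if_false, step]
      exact ih ids c

-- B's backward loop appends the descending remainders of the positive gaps
theorem pvB_loop (l : List Int) : ∀ (out : List Int) (rem : Int),
    (l.foldl
      (fun (st : List Int × Int) gap =>
        if 0 < gap then (st.1 ++ [st.2], st.2 - gap) else st)
      (out, rem)).1 = out ++ pvDesc rem (l.filter (fun g => 0 < g)) := by
  induction l with
  | nil => simp [pvDesc]
  | cons g gs ih =>
    intro out rem
    by_cases hg : 0 < g
    · simp only [List.foldl_cons, List.filter_cons, hg, decide_true, if_true, ih]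
      simp [pvDesc]
    · simp only [List.foldl_cons, List.filter_cons, hg, decide_false,
        Bool.false_eq_true, if_false]
      exact ih out rem

theorem pvDesc_append (l1 l2 : List Int) : ∀ (r : Int),
    pvDesc r (l1 ++ l2) = pvDesc r l1 ++ pvDesc (r - l1.sum) l2 := by
  induction l1 with
  | nil => intro r; simp [pvDesc]
  | cons x xs ih =>
    intro r
    simp only [List.cons_append, pvDesc, ih (r - x), List.sum_cons, List.cons_append]
    congr 2
    ring_nf

-- descending remainders of the reversed list, started at c + sum, reverse to the prefix sums
theorem pvDesc_reverse (ps : List Int) : ∀ (c : Int),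
    (pvDesc (c + ps.sum) ps.reverse).reverse = pvPrefixes c ps := by
  induction ps with
  | nil => intro c; simp [pvDesc, pvPrefixes]
  | cons x xs ih =>
    intro c
    have h : pvDesc (c + (x :: xs).sum) (x :: xs).reverse
        = pvDesc ((c + x) + xs.sum) xs.reverse ++ [c + x] := by
      rw [List.reverse_cons, pvDesc_append]
      have e1 : c + (x :: xs).sum = (c + x) + xs.sum := by simp [List.sum_cons]; ring
      have e2 : (c + x) + xs.sum - xs.reverse.sum = c + x := by simp
      rw [e1, e2]
      simp [pvDesc]
    rw [h, List.reverse_append, ih (c + x)]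
    simp [pvPrefixes]

theorem pvB_eq (gaps : List Int) :
    ids_from_gaps_py_alt gaps = pvPrefixes 0 (gaps.filter (fun g => 0 < g)) := by
  show ((gaps.reverse.foldl
      (fun (st : List Int × Int) gap =>
        if 0 < gap then (st.1 ++ [st.2], st.2 - gap) else st)
      ([], (gaps.filter (fun g => 0 < g)).sum)).1).reverse
    = pvPrefixes 0 (gaps.filter (fun g => 0 < g))
  rw [pvB_loop]
  rw [List.filter_reverse]
  have e : (gaps.filter (fun g => 0 < g)).sum = 0 + (gaps.filter (fun g => 0 < g)).sum := by ring
  rw [List.nil_append, e, pvDesc_reverse]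

-- ===== VERDICT (by name: the statement is the Claim_ definition above) =====
theorem ids_from_gaps_py_spec : Claim_equal_ids_from_gaps_py := by
  intro gaps _
  unfold Spec_ids_from_gaps_py
  rw [pvB_eq]
  unfold ids_from_gaps_py
  exact pvA_eq gaps [] 0
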